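-- pv_equiv track=rewrite | github.com/AnshMittal1811/MachineLearning-AI | 087_Introduction_to_Data_Mining_and_Knowledge_Graphs/ay_hw_6/python/task2_k.py | findLongestTrailing
-- ===== SOURCE A (Python) =====
-- def findLongestTrailing(list_obj):
--     max_length = 0
--     for str_value in list_obj:
--         temp_count = 0
--         for char in list(''.join(reversed(str_value))):
--             if char == '0':
--                 temp_count += 1
--             else:
--                 break
--         max_length = max(max_length, temp_count)
--     return max_length
-- ===== SOURCE B (Python) =====
-- def findLongestTrailing(list_obj):
--     k = 0
--     while any(s.endswith('0' * (k + 1)) for s in list_obj):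
--         k += 1
--     return k
-- ===== Notes on version B (the rewrite author's own statement) =====
-- stated objective: alternative
-- what changed: B never computes a per-string trailing-zero count or a running max: it searches the answer value itself, incrementing k while some string ends with the suffix '0'*(k+1), stopping at the first k no string reaches.
import Mathlib
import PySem

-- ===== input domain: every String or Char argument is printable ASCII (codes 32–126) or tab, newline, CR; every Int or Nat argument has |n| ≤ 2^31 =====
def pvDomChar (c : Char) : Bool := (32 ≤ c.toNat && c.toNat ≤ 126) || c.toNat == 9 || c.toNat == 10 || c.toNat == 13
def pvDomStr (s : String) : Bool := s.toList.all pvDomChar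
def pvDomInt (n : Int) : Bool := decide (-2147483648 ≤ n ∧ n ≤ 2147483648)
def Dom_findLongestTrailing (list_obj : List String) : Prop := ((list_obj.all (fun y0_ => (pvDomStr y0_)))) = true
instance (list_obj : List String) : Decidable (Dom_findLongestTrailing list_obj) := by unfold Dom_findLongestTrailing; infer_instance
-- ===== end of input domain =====

-- B finds the answer value directly: increment k while some string ends with '0'*(k+1),
-- instead of A's per-string reversed-scan count + running max (objective: alternative).


-- ===== PORT A =====
-- inner loop: for char in reversed(str_value): if char == '0': temp_count += 1 else: break
def pvCountA : List Char → Int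
  | [] => 0
  | c :: rest => if c == '0' then 1 + pvCountA rest else 0

def findLongestTrailing (list_obj : List String) : Int :=
  list_obj.foldl (fun max_length str_value =>
    max max_length (pvCountA str_value.toList.reverse)) 0

-- ===== PORT B =====
-- any(s.endswith('0' * (k + 1)) for s in list_obj)
def pvAnyEnds (list_obj : List String) (k : Nat) : Bool :=
  list_obj.any (fun s => PySem.Str.endswith s (String.ofList (List.replicate k '0')))

-- Python's unbounded 'while'; the fuel only makes the same iteration total
-- (it is proved sufficient: the loop must stop once k reaches the longest string's length).
def pvLoopB (list_obj : List String) : Nat → Nat → Nat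
  | 0, k => k
  | fuel + 1, k => if pvAnyEnds list_obj (k + 1) then pvLoopB list_obj fuel (k + 1) else k

def findLongestTrailing_alt (list_obj : List String) : Int :=
  (pvLoopB list_obj (list_obj.foldl (fun m s => max m s.toList.length) 0) 0 : Int)

-- ===== PRECONDITION & SPEC =====
def Spec_findLongestTrailing (list_obj : List String) (out : Int) : Prop := out = findLongestTrailing_alt list_obj
instance (list_obj : List String) (out : Int) : Decidable (Spec_findLongestTrailing list_obj out) := by unfold Spec_findLongestTrailing; infer_instance

-- ===== CLAIM (what is proved, stated in full; the proofs are below) =====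
def Claim_equal_findLongestTrailing : Prop := ∀ (list_obj : List String), Dom_findLongestTrailing list_obj → Spec_findLongestTrailing list_obj (findLongestTrailing list_obj)

-- ===== LEMMAS AND PROOFS =====

-- A's inner count as a Nat: length of the leading '0'-run of the reversed chars
def pvTzN (s : String) : Nat := (s.toList.reverse.takeWhile (fun c => c == '0')).length

theorem pvCountA_eq_tzN (s : String) : pvCountA s.toList.reverse = (pvTzN s : Int) := by
  rw [pvTzN]
  generalize s.toList.reverse = xs
  induction xs with
  | nil => simp [pvCountA]
  | cons c rest ih =>
    by_cases h : c = '0'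
    · simp [pvCountA, List.takeWhile, h, ih]; omega
    · simp [pvCountA, List.takeWhile, show (c == '0') = false from by simp [h]]

-- A's result is the Nat max of the counts
def pvMaxN (list_obj : List String) : Nat :=
  list_obj.foldl (fun m s => max m (pvTzN s)) 0

theorem findLongestTrailing_eq_maxN (l : List String) :
    findLongestTrailing l = (pvMaxN l : Int) := by
  unfold findLongestTrailing pvMaxN
  suffices h : ∀ (a : Nat),
      l.foldl (fun m s => max m (pvCountA s.toList.reverse)) (a : Int)
        = ((l.foldl (fun m s => max m (pvTzN s)) a : Nat) : Int) by
    exact h 0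
  induction l with
  | nil => intro a; rfl
  | cons x t ih =>
    intro a
    rw [List.foldl_cons, List.foldl_cons, pvCountA_eq_tzN,
      show max (a : Int) ((pvTzN x : Nat) : Int) = ((max a (pvTzN x) : Nat) : Int) by
        push_cast; rfl]
    exact ih _

theorem replicate_prefix_iff (k : Nat) (xs : List Char) :
    List.replicate k '0' <+: xs ↔ k ≤ (xs.takeWhile (fun c => c == '0')).length := by
  induction k generalizing xs with
  | zero => simp
  | succ n ih =>
    cases xs with
    | nil => simp [List.replicate_succ]
    | cons c rest =>
      by_cases h : c = '0'
      · simp [List.replicate_succ, h, List.takeWhile, ih]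
      · simp [List.replicate_succ, List.takeWhile, show (c == '0') = false from by simp [h],
          List.cons_prefix_cons, Ne.symm h]

theorem endswith_iff_tzN (s : String) (k : Nat) :
    PySem.Str.endswith s (String.ofList (List.replicate k '0')) = true ↔ k ≤ pvTzN s := by
  rw [show PySem.Str.endswith s (String.ofList (List.replicate k '0'))
      = PySem.Chars.endswith s.toList (List.replicate k '0') by simp]
  rw [PySem.Chars.endswith_iff, pvTzN, ← List.reverse_prefix, List.reverse_replicate]
  exact replicate_prefix_iff k s.toList.reverse

-- anyEnds with k+1 zeros tests whether the max count reaches k+1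
theorem anyEnds_iff (l : List String) (k : Nat) :
    pvAnyEnds l (k + 1) = true ↔ k + 1 ≤ pvMaxN l := by
  unfold pvAnyEnds
  rw [List.any_eq_true]
  have hmax : ∀ (a : Nat), k + 1 ≤ l.foldl (fun m s => max m (pvTzN s)) a ↔
      (k + 1 ≤ a ∨ ∃ s ∈ l, k + 1 ≤ pvTzN s) := by
    induction l with
    | nil => intro a; simp
    | cons x t ih =>
      intro a
      rw [List.foldl_cons, ih]
      constructor
      · rintro (h | h)
        · rcases le_max_iff.mp h with h | h
          · exact Or.inl h
          · exact Or.inr ⟨x, List.mem_cons_self, h⟩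
        · obtain ⟨s, hs, h⟩ := h
          exact Or.inr ⟨s, List.mem_cons_of_mem _ hs, h⟩
      · rintro (h | ⟨s, hs, h⟩)
        · exact Or.inl (le_max_iff.mpr (Or.inl h))
        · rcases List.mem_cons.mp hs with rfl | hs
          · exact Or.inl (le_max_iff.mpr (Or.inr h))
          · exact Or.inr ⟨s, hs, h⟩
  unfold pvMaxN
  rw [hmax 0]
  simp only [endswith_iff_tzN]
  constructor
  · rintro ⟨s, hs, h⟩; exact Or.inr ⟨s, hs, h⟩
  · rintro (h | h)
    · omega
    · exact h

theorem tzN_le_len (s : String) : pvTzN s ≤ s.toList.length := by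
  unfold pvTzN
  calc (s.toList.reverse.takeWhile (fun c => c == '0')).length
      ≤ s.toList.reverse.length := (List.takeWhile_prefix _).length_le
    _ = s.toList.length := List.length_reverse

theorem maxN_le_fuel (l : List String) :
    pvMaxN l ≤ l.foldl (fun m s => max m s.toList.length) 0 := by
  unfold pvMaxN
  suffices h : ∀ (a b : Nat), a ≤ b →
      l.foldl (fun m s => max m (pvTzN s)) a ≤ l.foldl (fun m s => max m s.toList.length) b by
    exact h 0 0 le_rfl
  induction l with
  | nil => intro a b h; exact h
  | cons x t ih =>
    intro a b h
    exact ih _ _ (max_le_max h (tzN_le_len x))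

theorem loopB_eq (l : List String) (fuel k : Nat)
    (hk : k ≤ pvMaxN l) (hf : pvMaxN l ≤ k + fuel) :
    pvLoopB l fuel k = pvMaxN l := by
  induction fuel generalizing k with
  | zero => simpa [pvLoopB] using le_antisymm hk (by omega)
  | succ n ih =>
    unfold pvLoopB
    by_cases h : pvAnyEnds l (k + 1) = true
    · rw [if_pos h]
      exact ih (k + 1) ((anyEnds_iff l k).mp h) (by omega)
    · rw [if_neg h]
      have := (anyEnds_iff l k).not.mp h
      omega

theorem findLongestTrailing_spec : Claim_equal_findLongestTrailing := by
  intro l _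
  show findLongestTrailing l = findLongestTrailing_alt l
  rw [findLongestTrailing_eq_maxN, findLongestTrailing_alt,
    loopB_eq l _ 0 (Nat.zero_le _) (by simpa using maxN_le_fuel l)]
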